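-- pv_equiv track=rewrite | github.com/queelius/computational-explorations | src/primitive_coprime.py | greedy_max_primitive_coprime
-- ===== SOURCE A (Python) =====
-- import math
-- from typing import Set, List, Tuple, Dict, Any, Optional
--
-- def coprime_pair_count(A: Set[int]) -> int:
--     """Count coprime pairs in A."""
--     A_list = sorted(A)
--     count = 0
--     for i in range(len(A_list)):
--         for j in range(i + 1, len(A_list)):
--             if math.gcd(A_list[i], A_list[j]) == 1:
--                 count += 1
--     return count
--
-- def primes_up_to(n: int) -> Set[int]:
--     """Sieve of Eratosthenes."""
--     if n < 2:
--         return set()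
--     sieve = [True] * (n + 1)
--     sieve[0] = sieve[1] = False
--     for i in range(2, int(n**0.5) + 1):
--         if sieve[i]:
--             for j in range(i * i, n + 1, i):
--                 sieve[j] = False
--     return {i for i, is_p in enumerate(sieve) if is_p}
--
-- def greedy_max_primitive_coprime(n: int) -> Tuple[int, Set[int]]:
--     """
--     Greedy heuristic: build a primitive set maximizing coprime pairs.
--
--     Strategy: start with primes, then try adding elements
--     that increase M(A) the most.
--     """
--     primes = sorted(primes_up_to(n))
--     current = set(primes)
--
--     candidates = [x for x in range(2, n + 1) if x not in current]
--
--     improved = True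
--     while improved:
--         improved = False
--         best_gain = 0
--         best_add = None
--
--         for x in candidates:
--             if x in current:
--                 continue
--             ok = all(x % c != 0 and c % x != 0 for c in current)
--             if not ok:
--                 continue
--             gain = sum(1 for c in current if math.gcd(x, c) == 1)
--             if gain > best_gain:
--                 best_gain = gain
--                 best_add = x
--
--         if best_add is not None and best_gain > 0:
--             current.add(best_add)
--             improved = True
--
--     M = coprime_pair_count(current)
--     return M, current
-- ===== SOURCE B (Python) =====
-- import math
--
-- def greedy_max_primitive_coprime(n):
--     # Every composite <= n is divisible by a smaller prime, so the greedy step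
--     # never adds anything: the set is exactly the primes up to n, and all
--     # distinct primes are pairwise coprime, so M is a closed-form binomial.
--     primes = [p for p in range(2, n + 1)
--               if all(p % d != 0 for d in range(2, math.isqrt(p) + 1))]
--     k = len(primes)
--     return k * (k - 1) // 2, set(primes)
-- ===== Notes on version B (the rewrite author's own statement) =====
-- stated objective: faster
-- what changed: B drops A's sieve, dead greedy while-loop and O(k^2) gcd double-loop entirely: it lists primes by sqrt-bounded trial division and returns the closed-form pair count k*(k-1)//2, since every composite candidate is divisible by a prime already present (the greedy step never fires) and distinct primes are pairwise coprime.
import Mathlib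
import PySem

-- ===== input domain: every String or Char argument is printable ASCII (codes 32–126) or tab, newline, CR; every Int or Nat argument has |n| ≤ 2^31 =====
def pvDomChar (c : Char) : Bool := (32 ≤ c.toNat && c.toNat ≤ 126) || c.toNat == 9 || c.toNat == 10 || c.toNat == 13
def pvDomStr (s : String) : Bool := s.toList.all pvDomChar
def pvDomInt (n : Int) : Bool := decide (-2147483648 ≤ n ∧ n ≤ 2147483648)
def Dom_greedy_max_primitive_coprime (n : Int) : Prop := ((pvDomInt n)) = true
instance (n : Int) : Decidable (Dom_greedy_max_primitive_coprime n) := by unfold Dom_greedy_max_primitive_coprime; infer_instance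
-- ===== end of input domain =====

-- B replaces A's sieve, its greedy while-loop (which never fires: every composite
-- candidate is divisible by a prime already present) and its gcd double-loop by a
-- sqrt-bounded trial-division prime list and the closed-form pair count k*(k-1)//2.

-- ===== PORT A =====
-- inner marking loop: for j in range(i*i, n+1, i): sieve[j] = False
def pvSieveMark (n : Int) (s : List Bool) (i : Int) : List Bool :=
  (PySem.List.pyRange (i*i) (n+1) i).foldl (fun s j => PySem.List.pySetD s j false) s

-- sieve of primes_up_to; int(n**0.5) is exact = Nat.sqrt for 2 ≤ n ≤ 2^31 (checked against CPython)
def pvSieve (n : Int) : List Bool :=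
  let s0 := List.replicate (n+1).toNat true
  let s1 := PySem.List.pySetD (PySem.List.pySetD s0 0 false) 1 false
  (PySem.List.pyRange 2 ((n.toNat.sqrt : Int) + 1) 1).foldl
    (fun s i => if PySem.List.pyGetD s i false then pvSieveMark n s i else s) s1

-- primes_up_to: set comprehension over enumerate(sieve) (ascending insertion order)
def pvPrimesUpTo (n : Int) : List Int :=
  if n < 2 then [] else
    ((PySem.List.enumerate (pvSieve n)).filter (fun p => p.2)).map (fun p => p.1)

-- one pass of the for-x-in-candidates scan, accumulating (best_gain, best_add)
def pvGreedyScan (current : PySem.Set Int) (candidates : List Int) : Int × Option Int :=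
  candidates.foldl (fun st x =>
    if PySem.Set.contains current x then st
    else if current.all (fun c => decide (PySem.Int.mod x c ≠ 0) && decide (PySem.Int.mod c x ≠ 0)) then
      let gain : Int := (current.map (fun c => if Int.gcd x c = 1 then (1:Int) else 0)).sum
      if gain > st.1 then (gain, some x) else st
    else st) (0, none)

-- while improved: each pass either adds best_add (and loops) or stops; fuel
-- candidates.length+1 bounds the number of passes (each add removes a candidate)
def pvGreedyLoop (candidates : List Int) : Nat → PySem.Set Int → PySem.Set Int
  | 0, current => current
  | fuel+1, current =>
    let bg := pvGreedyScan current candidates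
    match bg.2 with
    | some x => if bg.1 > 0 then pvGreedyLoop candidates fuel (PySem.Set.add current x) else current
    | none => current

def pvCoprimePairCount (A : List Int) : Int :=
  let l := PySem.List.sorted A (fun x => x) false
  (PySem.List.pyRange 0 (l.length : Int) 1).foldl (fun cnt i =>
    (PySem.List.pyRange (i+1) (l.length : Int) 1).foldl (fun cnt j =>
      if Int.gcd (PySem.List.pyGetD l i 0) (PySem.List.pyGetD l j 0) = 1 then cnt + 1 else cnt) cnt) 0

def greedy_max_primitive_coprime (n : Int) : Int × List Int :=
  let primes := PySem.List.sorted (pvPrimesUpTo n) (fun x => x) false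
  let current : PySem.Set Int := PySem.Set.ofList primes
  let candidates := (PySem.List.pyRange 2 (n+1) 1).filter (fun x => !(PySem.Set.contains current x))
  let final := pvGreedyLoop candidates (candidates.length + 1) current
  (pvCoprimePairCount final, final)

-- ===== PORT B =====
-- math.isqrt = Nat.sqrt (exact)
def greedy_max_primitive_coprime_alt (n : Int) : Int × List Int :=
  let primes := (PySem.List.pyRange 2 (n+1) 1).filter
    (fun p => (PySem.List.pyRange 2 ((p.toNat.sqrt : Int) + 1) 1).all (fun d => decide (PySem.Int.mod p d ≠ 0)))
  let k : Int := primes.length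
  (PySem.Int.floordiv (k * (k - 1)) 2, PySem.Set.ofList primes)

-- ===== PRECONDITION & SPEC =====
def Spec_greedy_max_primitive_coprime (n : Int) (out : Int × List Int) : Prop := out = greedy_max_primitive_coprime_alt n
instance (n : Int) (out : Int × List Int) : Decidable (Spec_greedy_max_primitive_coprime n out) := by unfold Spec_greedy_max_primitive_coprime; infer_instance

-- ===== CLAIM (what is proved, stated in full; the proofs are below) =====
def Claim_equal_greedy_max_primitive_coprime : Prop := ∀ (n : Int), Dom_greedy_max_primitive_coprime n → Spec_greedy_max_primitive_coprime n (greedy_max_primitive_coprime n)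

-- ===== LEMMAS AND PROOFS =====

-- the reference list: primes in [2, n], ascending
def pvPRef (n : Int) : List Int :=
  (PySem.List.pyRange 2 (n+1) 1).filter (fun p => decide (Nat.Prime p.toNat))

-- m is already struck out once the outer sieve loop has processed every i' < i
def pvDead (i : Int) (m : Nat) : Prop :=
  m < 2 ∨ ∃ p : Nat, 2 ≤ p ∧ (p:Int) < i ∧ p ∣ m ∧ p * p ≤ m

-- sieve loop invariant
def pvInv (N : Nat) (i : Int) (s : List Bool) : Prop :=
  s.length = N + 1 ∧ ∀ m : Nat, m ≤ N → (s.getD m false = false ↔ pvDead i m)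

lemma pvFoldlSetFalse_length (L : List Int) (s : List Bool) :
    (L.foldl (fun s j => PySem.List.pySetD s j false) s).length = s.length := by
  induction L generalizing s with
  | nil => rfl
  | cons j L ih => simp [List.foldl_cons, ih, PySem.List.length_pySetD]

lemma pvFoldlSetFalse_getD (L : List Int) (hL : ∀ j ∈ L, 0 ≤ j) (s : List Bool) (m : Nat) :
    ((L.foldl (fun s j => PySem.List.pySetD s j false) s).getD m false = false ↔
      (s.getD m false = false ∨ ((m:Int) ∈ L ∧ m < s.length))) := by
  induction L generalizing s with
  | nil => simp
  | cons j L ih =>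
    have hj : 0 ≤ j := hL j (by simp)
    have hL' : ∀ j ∈ L, 0 ≤ j := fun x hx => hL x (by simp [hx])
    rw [List.foldl_cons, PySem.List.pySetD_of_nonneg _ _ hj, ih hL']
    have hlen : (s.set j.toNat false).length = s.length := by simp
    rw [hlen]
    have hget : (s.set j.toNat false).getD m false = false ↔
        (s.getD m false = false ∨ ((m:Int) = j ∧ m < s.length)) := by
      rw [List.getD_eq_getElem?_getD, List.getD_eq_getElem?_getD, List.getElem?_set]
      by_cases hjm : j.toNat = m
      · have : (m:Int) = j := by omega
        by_cases hm : m < s.length <;> simp [hjm, hm, this]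
      · have : ¬ (m:Int) = j := by omega
        simp [hjm, this]
    rw [hget]
    constructor
    · rintro (⟨h | h⟩ | h)
      · exact Or.inl h
      · exact Or.inr ⟨by simp [h.1], h.2⟩
      · exact Or.inr ⟨by simp [h.1], h.2⟩
    · rintro (h | ⟨h, hm⟩)
      · exact Or.inl (Or.inl h)
      · rcases List.mem_cons.mp h with h | h
        · exact Or.inl (Or.inr ⟨h, hm⟩)
        · exact Or.inr ⟨h, hm⟩

-- generic invariant for a fold over range(a, b)
lemma pvLoopInv (P : Int → List Bool → Prop) (step : List Bool → Int → List Bool) (b : Int) :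
    ∀ (a : Int) (s : List Bool),
      (∀ i t, a ≤ i → i < b → P i t → P (i+1) (step t i)) → P a s → a ≤ b →
      P b ((PySem.List.pyRange a b 1).foldl step s) := by
  intro a s hstep hP hab
  obtain ⟨k, hk⟩ : ∃ k : Nat, b - a = (k : Int) := ⟨(b-a).toNat, by omega⟩
  induction k generalizing a s with
  | zero =>
    have : b = a := by omega
    subst this
    rw [PySem.List.pyRange_one_eq_nil (by omega)]
    exact hP
  | succ k ih =>
    have hab' : a < b := by omega
    rw [PySem.List.pyRange_one_cons hab', List.foldl_cons]
    exact ih (a+1) (step s a) (fun i t h1 h2 => hstep i t (by omega) h2)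
      (hstep a s (le_refl a) hab' hP) (by omega) (by omega)

lemma pvStep (n : Int) (hn : 2 ≤ n) (i : Int) (hi2 : 2 ≤ i) (hir : i ≤ (n.toNat.sqrt : Int))
    (s : List Bool) (h : pvInv n.toNat i s) :
    pvInv n.toNat (i+1) (if PySem.List.pyGetD s i false then pvSieveMark n s i else s) := by
  obtain ⟨hlen, hchar⟩ := h
  have hiN : i.toNat ≤ n.toNat := by
    have h2 : n.toNat.sqrt ≤ n.toNat := Nat.sqrt_le_self _
    omega
  have hgd : PySem.List.pyGetD s i false = s.getD i.toNat false :=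
    PySem.List.pyGetD_of_nonneg s false (by omega)
  rw [hgd]
  by_cases hg : s.getD i.toNat false = true
  · -- i survives: mark multiples of i from i*i
    rw [if_pos hg]
    have hiDead : ¬ pvDead i i.toNat := by
      intro hd
      have := (hchar i.toNat hiN).mpr hd
      rw [this] at hg; exact Bool.false_ne_true hg
    constructor
    · rw [pvSieveMark, pvFoldlSetFalse_length]; exact hlen
    · intro m hm
      rw [pvSieveMark, pvFoldlSetFalse_getD _ (by
          intro j hj
          rw [PySem.List.mem_pyRange_iff_of_pos (by omega)] at hj
          have : (0:Int) ≤ i*i := by positivity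
          omega)]
      rw [hchar m hm, PySem.List.mem_pyRange_iff_of_pos (by omega : (0:Int) < i), hlen]
      have hmlt : m < n.toNat + 1 := by omega
      constructor
      · rintro (hd | ⟨⟨h1, h2, h3⟩, _⟩)
        · rcases hd with h | ⟨p, hp1, hp2, hp3, hp4⟩
          · exact Or.inl h
          · exact Or.inr ⟨p, hp1, by omega, hp3, hp4⟩
        · -- newly marked: p = i.toNat
          refine Or.inr ⟨i.toNat, by omega, by omega, ?_, ?_⟩
          · have hdm : i ∣ (m:Int) := by
              have hii : i ∣ i*i := Dvd.intro i rfl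
              have := Int.dvd_add h3 hii
              rwa [sub_add_cancel] at this
            have hi' : ((i.toNat : Nat) : Int) = i := by omega
            rw [← hi'] at hdm
            exact_mod_cast hdm
          · have hi' : ((i.toNat : Nat) : Int) = i := by omega
            have h1' : ((i.toNat * i.toNat : Nat) : Int) ≤ (m : Int) := by push_cast; rw [hi']; exact h1
            exact_mod_cast h1' 
      · rintro (h | ⟨p, hp1, hp2, hp3, hp4⟩)
        · exact Or.inl (Or.inl h)
        · by_cases hpi : (p:Int) < i
          · exact Or.inl (Or.inr ⟨p, hp1, hpi, hp3, hp4⟩)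
          · have hpe : (p:Int) = i := by omega
            refine Or.inr ⟨⟨?_, ?_, ?_⟩, by omega⟩
            · have hc : ((p:Int)) * (p:Int) ≤ (m:Int) := by exact_mod_cast hp4
              rw [← hpe]; exact hc
            · omega
            · have : (p:Int) ∣ (m:Int) := Int.natCast_dvd_natCast.mpr hp3
              have h2 : i ∣ (m:Int) := hpe ▸ this
              have h3 : i ∣ i*i := Dvd.intro i rfl
              exact Int.dvd_sub h2 h3
  · -- i already dead: sieve unchanged; Dead i ↔ Dead (i+1)
    rw [if_neg hg]
    have hiDead : pvDead i i.toNat := (hchar i.toNat hiN).mp (by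
      cases hb : s.getD i.toNat false
      · rfl
      · exact absurd hb hg)
    refine ⟨hlen, fun m hm => ?_⟩
    rw [hchar m hm]
    constructor
    · rintro (h | ⟨p, hp1, hp2, hp3, hp4⟩)
      · exact Or.inl h
      · exact Or.inr ⟨p, hp1, by omega, hp3, hp4⟩
    · rintro (h | ⟨p, hp1, hp2, hp3, hp4⟩)
      · exact Or.inl h
      · by_cases hpi : (p:Int) < i
        · exact Or.inr ⟨p, hp1, hpi, hp3, hp4⟩
        · have hpe : p = i.toNat := by omega
          rcases hiDead with h' | ⟨q, hq1, hq2, hq3, hq4⟩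
          · omega
          · have hqp : q ∣ p := hpe ▸ hq3
            refine Or.inr ⟨q, hq1, hq2, hqp.trans hp3, ?_⟩
            calc q * q ≤ p := hpe ▸ hq4
              _ ≤ p * p := Nat.le_mul_of_pos_right p (by omega)
              _ ≤ m := hp4

lemma pvBase (n : Int) (hn : 2 ≤ n) :
    pvInv n.toNat 2 (PySem.List.pySetD (PySem.List.pySetD (List.replicate (n+1).toNat true) 0 false) 1 false) := by
  have hN : 2 ≤ n.toNat := by omega
  have hlen' : (n+1).toNat = n.toNat + 1 := by omega
  rw [PySem.List.pySetD_of_nonneg _ _ (by omega), PySem.List.pySetD_of_nonneg _ _ (by omega)]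
  constructor
  · simp [hlen']
  · intro m hm
    have : ((((List.replicate (n+1).toNat true).set (0:Int).toNat false).set (1:Int).toNat false).getD m false)
        = if m < 2 then false else true := by
      have hlt : m < (List.replicate (n+1).toNat (true:Bool)).length := by
        simp [hlen']; omega
      rw [List.getD_eq_getElem?_getD, List.getElem?_set, List.getElem?_set]
      simp only [Int.toNat_one, Int.toNat_zero, List.getElem?_replicate, List.length_set]
      split_ifs <;> simp_all <;> omega
    rw [this]
    constructor
    · intro hf
      by_cases h2 : m < 2
      · exact Or.inl h2
      · rw [if_neg h2] at hf; exact absurd hf (by simp)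
    · rintro (h2 | ⟨p, hp1, hp2, _, _⟩)
      · rw [if_pos h2]
      · omega

lemma pvSieve_inv (n : Int) (hn : 2 ≤ n) : pvInv n.toNat ((n.toNat.sqrt : Int) + 1) (pvSieve n) := by
  have hs1 : 1 ≤ n.toNat.sqrt := by
    have := Nat.le_sqrt.mpr (show 1*1 ≤ n.toNat by omega); omega
  refine pvLoopInv (pvInv n.toNat) _ _ 2 _ ?_ (pvBase n hn) (by omega)
  intro i t h1 h2 hP
  exact pvStep n hn i h1 (by omega) t hP


lemma pvSieve_len (n : Int) (hn : 2 ≤ n) : (pvSieve n).length = n.toNat + 1 :=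
  (pvSieve_inv n hn).1

lemma pvSieve_getD (n : Int) (hn : 2 ≤ n) (m : Nat) (hm : m ≤ n.toNat) :
    (pvSieve n).getD m false = decide (Nat.Prime m) := by
  obtain ⟨hlen, hchar⟩ := pvSieve_inv n hn
  have key : (pvSieve n).getD m false = false ↔ pvDead ((n.toNat.sqrt : Int) + 1) m := hchar m hm
  have hiff : pvDead ((n.toNat.sqrt : Int) + 1) m ↔ ¬ (Nat.Prime m) := by
    constructor
    · rintro (h2 | ⟨p, hp1, _, hp3, hp4⟩)
      · intro hpr; exact absurd hpr.two_le (by omega)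
      · intro hpr
        rcases (Nat.Prime.eq_one_or_self_of_dvd hpr p hp3) with h | h
        · omega
        · subst h; nlinarith [hpr.two_le]
    · intro hnp
      by_cases h2 : m < 2
      · exact Or.inl h2
      · have hm1 : m ≠ 1 := by omega
        have hpf := Nat.minFac_prime hm1
        have hd := Nat.minFac_dvd m
        have hsq : m.minFac * m.minFac ≤ m := by
          have := Nat.minFac_sq_le_self (by omega) hnp
          simpa [pow_two] using this
        refine Or.inr ⟨m.minFac, hpf.two_le, ?_, hd, hsq⟩
        have : m.minFac ≤ n.toNat.sqrt := Nat.le_sqrt.mpr (hsq.trans hm)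
        omega
  cases hb : (pvSieve n).getD m false
  · have := hiff.mp (key.mp hb)
    simp [this]
  · have : ¬ pvDead ((n.toNat.sqrt : Int) + 1) m := fun hd => by
      rw [key.mpr hd] at hb; exact Bool.false_ne_true hb
    have hp : Nat.Prime m := not_not.mp (fun hnp => this (hiff.mpr hnp))
    simp [hp]

lemma pvMapFst (l : List Int) (f : Int → Bool) :
    List.map ((fun (p : Int × Bool) => p.1) ∘ fun j => (j, f j)) l = l := by
  induction l with
  | nil => rfl
  | cons x xs ih => simpa using ih

lemma pvPrimesUpTo_eq (n : Int) : pvPrimesUpTo n = pvPRef n := by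
  by_cases hn : n < 2
  · rw [pvPrimesUpTo, if_pos hn, pvPRef, PySem.List.pyRange_one_eq_nil (by omega)]
    rfl
  · rw [not_lt] at hn
    rw [pvPrimesUpTo, if_neg (by omega)]
    rw [PySem.List.enumerate_eq_map_pyRange _ false, List.filter_map, List.map_map]
    have hlen : (PySem.List.len (pvSieve n) : Int) = n + 1 := by
      simp [PySem.List.len, pvSieve_len n hn]; omega
    rw [hlen]
    have hsplit : PySem.List.pyRange 0 (n+1) 1 = PySem.List.pyRange 0 2 1 ++ PySem.List.pyRange 2 (n+1) 1 :=
      PySem.List.pyRange_one_append 0 2 (n+1) (by omega) (by omega)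
    rw [hsplit, List.filter_append, List.map_append]
    have h01 : PySem.List.pyRange 0 2 1 = [0, 1] := by decide
    have hfilter1 : List.filter ((fun p => p.2) ∘ (fun j => (j, PySem.List.pyGetD (pvSieve n) j false))) (PySem.List.pyRange 0 2 1) = [] := by
      rw [h01]
      have g0 : PySem.List.pyGetD (pvSieve n) 0 false = false := by
        rw [PySem.List.pyGetD_of_nonneg _ _ (by omega)]
        simpa using pvSieve_getD n hn 0 (by omega)
      have g1 : PySem.List.pyGetD (pvSieve n) 1 false = false := by
        rw [PySem.List.pyGetD_of_nonneg _ _ (by omega)]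
        simpa using pvSieve_getD n hn 1 (by omega)
      simp [List.filter, g0, g1]
    rw [hfilter1]
    have hfilter2 : List.filter ((fun p => p.2) ∘ (fun j => (j, PySem.List.pyGetD (pvSieve n) j false))) (PySem.List.pyRange 2 (n+1) 1)
        = List.filter (fun p => decide (Nat.Prime p.toNat)) (PySem.List.pyRange 2 (n+1) 1) := by
      apply List.filter_congr
      intro j hj
      rw [PySem.List.mem_pyRange_one] at hj
      simp only [Function.comp]
      rw [PySem.List.pyGetD_of_nonneg _ _ (by omega)]
      exact pvSieve_getD n hn j.toNat (by omega)
    rw [hfilter2]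
    simp only [List.map_nil, List.nil_append]
    exact pvMapFst _ _

lemma pvPRef_pairwise (n : Int) : (pvPRef n).Pairwise (· < ·) :=
  (PySem.List.pairwise_lt_pyRange_one 2 (n+1)).filter _

lemma pvPRef_nodup (n : Int) : (pvPRef n).Nodup :=
  (pvPRef_pairwise n).imp ne_of_lt

lemma pvMem_pPRef (n : Int) (x : Int) :
    x ∈ pvPRef n ↔ 2 ≤ x ∧ x < n + 1 ∧ Nat.Prime x.toNat := by
  simp [pvPRef, List.mem_filter, PySem.List.mem_pyRange_one]
  tauto

lemma pvAlt_primes_eq (n : Int) :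
    (PySem.List.pyRange 2 (n+1) 1).filter
      (fun p => (PySem.List.pyRange 2 ((p.toNat.sqrt : Int) + 1) 1).all
        (fun d => decide (PySem.Int.mod p d ≠ 0))) = pvPRef n := by
  rw [pvPRef]
  apply List.filter_congr
  intro p hp
  rw [PySem.List.mem_pyRange_one] at hp
  have hp2 : 2 ≤ p.toNat := by omega
  rw [Bool.eq_iff_iff, List.all_eq_true, decide_eq_true_iff]
  constructor
  · intro h
    rw [Nat.prime_def_le_sqrt]
    refine ⟨hp2, fun m hm2 hms hdvd => ?_⟩
    have hmem : ((m : Nat) : Int) ∈ PySem.List.pyRange 2 ((p.toNat.sqrt : Int) + 1) 1 := by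
      rw [PySem.List.mem_pyRange_one]; omega
    have hne := decide_eq_true_iff.mp (h _ hmem)
    apply hne
    rw [PySem.Int.mod_eq_zero_iff_dvd]
    have hcast : ((p.toNat : Nat) : Int) = p := by omega
    rw [← hcast]
    exact_mod_cast hdvd
  · intro hpr d hd
    rw [PySem.List.mem_pyRange_one] at hd
    rw [decide_eq_true_iff]
    intro h0
    rw [PySem.Int.mod_eq_zero_iff_dvd] at h0
    have hd2 : 2 ≤ d.toNat := by omega
    have hds : d.toNat ≤ p.toNat.sqrt := by omega
    have hdv : d.toNat ∣ p.toNat := by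
      have h1 : ((d.toNat : Nat) : Int) = d := by omega
      have h2 : ((p.toNat : Nat) : Int) = p := by omega
      rw [← h1, ← h2] at h0
      exact_mod_cast h0
    exact (Nat.prime_def_le_sqrt.mp hpr).2 d.toNat hd2 hds hdv

lemma pvFoldlFixed {α β : Type} (f : β → α → β) :
    ∀ (l : List α), (∀ x ∈ l, ∀ b, f b x = b) → ∀ st, l.foldl f st = st
  | [], _, _ => rfl
  | x :: xs, h, st => by
    rw [List.foldl_cons, h x (by simp) st]
    exact pvFoldlFixed f xs (fun y hy b => h y (by simp [hy]) b) st

lemma pvScan_dead (n : Int) :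
    pvGreedyScan (pvPRef n)
      ((PySem.List.pyRange 2 (n+1) 1).filter (fun x => !(PySem.Set.contains (pvPRef n) x))) = (0, none) := by
  apply pvFoldlFixed
  intro x hx st
  rw [List.mem_filter, Bool.not_eq_eq_eq_not, Bool.not_true] at hx
  obtain ⟨hxr, hxc⟩ := hx
  rw [PySem.List.mem_pyRange_one] at hxr
  have hxnot : x ∉ pvPRef n := by
    intro hmem
    rw [← PySem.Set.contains_iff (pvPRef n) x] at hmem
    rw [hmem] at hxc; cases hxc
  have hnp : ¬ Nat.Prime x.toNat := fun hpr => hxnot ((pvMem_pPRef n x).mpr ⟨hxr.1, hxr.2, hpr⟩)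
  have hx2 : 2 ≤ x.toNat := by omega
  -- the minimal prime factor of x witnesses that the `all` check fails
  have hq : (((x.toNat.minFac : Nat) : Int)) ∈ pvPRef n := by
    rw [pvMem_pPRef]
    have hpf := Nat.minFac_prime (show x.toNat ≠ 1 by omega)
    have hle : x.toNat.minFac ≤ x.toNat := Nat.minFac_le (by omega)
    exact ⟨by exact_mod_cast hpf.two_le, by omega, by simpa using hpf⟩
  have hall : (pvPRef n).all (fun c => decide (PySem.Int.mod x c ≠ 0) && decide (PySem.Int.mod c x ≠ 0)) = false := by
    rw [List.all_eq_false]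
    refine ⟨_, hq, ?_⟩
    have hmod : PySem.Int.mod x ((x.toNat.minFac : Nat) : Int) = 0 := by
      rw [PySem.Int.mod_eq_zero_iff_dvd]
      have h2 : ((x.toNat : Nat) : Int) = x := by omega
      rw [← h2]
      exact_mod_cast Nat.minFac_dvd x.toNat
    simp [hmod]
  rw [hxc] at *
  simp only [Bool.false_eq_true, if_false]
  rw [hall]
  simp

lemma pvSumTwo (m : Nat) (C : Int) :
    (((List.range m).map (fun (t : Nat) => C - (t:Int))).sum) * 2 = (m:Int) * (2*C - (m:Int) + 1) := by
  induction m with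
  | zero => simp
  | succ m ih =>
    rw [List.range_succ, List.map_append, List.sum_append]
    simp only [List.map_cons, List.map_nil, List.sum_cons, List.sum_nil]
    push_cast
    ring_nf
    ring_nf at ih
    linarith

lemma pvPairCount (l : List Int) (hlt : l.Pairwise (· < ·))
    (hp : ∀ x ∈ l, Nat.Prime x.toNat ∧ 2 ≤ x) :
    pvCoprimePairCount l = PySem.Int.floordiv ((l.length : Int) * ((l.length : Int) - 1)) 2 := by
  have hsorted : PySem.List.sorted l (fun x => x) false = l :=
    PySem.List.sorted_eq_self_of_pairwise l _ (hlt.imp le_of_lt)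
  rw [pvCoprimePairCount]
  simp only [hsorted]
  set K : Int := (l.length : Int) with hK
  -- every inner test succeeds: distinct primes are coprime
  have hcop : ∀ i j : Int, 0 ≤ i → i < j → j < K →
      Int.gcd (PySem.List.pyGetD l i 0) (PySem.List.pyGetD l j 0) = 1 := by
    intro i j h0 hij hjK
    have hiK : i < K := lt_trans hij hjK
    have hilen : i.toNat < l.length := by omega
    have hjlen : j.toNat < l.length := by omega
    rw [PySem.List.pyGetD_eq_getElem l 0 h0 (by omega),
        PySem.List.pyGetD_eq_getElem l 0 (by omega) (by omega)]
    have hltij : l[i.toNat] < l[j.toNat] :=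
      List.pairwise_iff_getElem.mp hlt i.toNat j.toNat hilen hjlen (by omega)
    obtain ⟨hpi, hgi⟩ := hp _ (l.getElem_mem hilen)
    obtain ⟨hpj, hgj⟩ := hp _ (l.getElem_mem hjlen)
    have hne : l[i.toNat].toNat ≠ l[j.toNat].toNat := by omega
    have : l[i.toNat].toNat.Coprime l[j.toNat].toNat := (Nat.coprime_primes hpi hpj).mpr hne
    have h1 : ((l[i.toNat].toNat : Nat) : Int) = l[i.toNat] := by omega
    have h2 : ((l[j.toNat].toNat : Nat) : Int) = l[j.toNat] := by omega
    rw [← h1, ← h2, Int.gcd_natCast_natCast]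
    exact this
  -- inner loop: counts K - (i+1) for each i
  have houter : (PySem.List.pyRange 0 K 1).foldl (fun cnt i =>
      (PySem.List.pyRange (i+1) K 1).foldl (fun cnt j =>
        if Int.gcd (PySem.List.pyGetD l i 0) (PySem.List.pyGetD l j 0) = 1 then cnt + 1 else cnt) cnt) 0
      = (PySem.List.pyRange 0 K 1).foldl (fun cnt i => cnt + ((K - (i+1)).toNat : Int)) 0 := by
    apply PySem.List.foldl_congr_mem
    intro cnt i hi
    rw [PySem.List.mem_pyRange_one] at hi
    have hbody : (fun (cnt : Int) (j : Int) => if Int.gcd (PySem.List.pyGetD l i 0) (PySem.List.pyGetD l j 0) = 1 then cnt + 1 else cnt)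
        = (fun (cnt : Int) (j : Int) => if (fun j => decide (Int.gcd (PySem.List.pyGetD l i 0) (PySem.List.pyGetD l j 0) = 1)) j = true then cnt + 1 else cnt) := by
      funext cnt j
      simp only [decide_eq_true_eq]
    rw [hbody, PySem.List.foldl_count_if (fun j => decide (Int.gcd (PySem.List.pyGetD l i 0) (PySem.List.pyGetD l j 0) = 1)) _ cnt]
    congr 1
    rw [List.countP_eq_length.mpr, PySem.List.length_pyRange_one]
    intro j hj
    rw [PySem.List.mem_pyRange_one] at hj
    exact decide_eq_true (hcop i j hi.1 (by omega) hj.2)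
  rw [houter, PySem.List.foldl_add, PySem.List.pyRange_one, List.map_map]
  have hmap : (List.range (K - 0).toNat).map ((fun i => ((K - (i+1)).toNat : Int)) ∘ (fun k : Nat => (0:Int) + k))
      = (List.range K.toNat).map (fun t : Nat => (K - 1) - (t:Int)) := by
    have : (K - 0).toNat = K.toNat := by omega
    rw [this]
    apply List.map_congr_left
    intro t ht
    rw [List.mem_range] at ht
    simp only [Function.comp]
    have : 0 ≤ K - ((0:Int) + t + 1) ∨ K.toNat = 0 := by omega
    omega
  rw [hmap]
  have hsum := pvSumTwo K.toNat (K - 1)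
  have hKnn : (K.toNat : Int) = K := by omega
  rw [hKnn] at hsum
  have hval : ((List.range K.toNat).map (fun t : Nat => (K - 1) - (t:Int))).sum = K * (K-1) / 2 := by
    have h2 : K * (2*(K-1) - K + 1) = K * (K - 1) := by ring
    rw [h2] at hsum
    omega
  rw [hval, PySem.Int.floordiv_eq_ediv_of_pos (by omega)]
  omega

lemma pvMain (n : Int) : greedy_max_primitive_coprime n = greedy_max_primitive_coprime_alt n := by
  rw [greedy_max_primitive_coprime, greedy_max_primitive_coprime_alt]
  simp only [pvPrimesUpTo_eq, pvAlt_primes_eq]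
  rw [PySem.List.sorted_eq_self_of_pairwise _ _ ((pvPRef_pairwise n).imp le_of_lt)]
  rw [PySem.Set.ofList_eq_self_of_nodup _ (pvPRef_nodup n)]
  have hloop : pvGreedyLoop
      ((PySem.List.pyRange 2 (n+1) 1).filter (fun x => !(PySem.Set.contains (pvPRef n) x)))
      (((PySem.List.pyRange 2 (n+1) 1).filter (fun x => !(PySem.Set.contains (pvPRef n) x))).length + 1)
      (pvPRef n) = pvPRef n := by
    rw [pvGreedyLoop]
    simp only [pvScan_dead n]
  rw [hloop]
  refine Prod.ext ?_ rfl
  · show pvCoprimePairCount (pvPRef n) = _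
    rw [pvPairCount (pvPRef n) (pvPRef_pairwise n)
      (fun x hx => by
        obtain ⟨h1, h2, h3⟩ := (pvMem_pPRef n x).mp hx
        exact ⟨h3, h1⟩)]

-- ===== VERDICT (by name: the statement is the Claim_ definition above) =====
theorem greedy_max_primitive_coprime_spec : Claim_equal_greedy_max_primitive_coprime := by
  intro n _
  unfold Spec_greedy_max_primitive_coprime
  exact pvMain n
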